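-- pv_equiv track=rewrite | github.com/GabrielTorland/advent_of_code | 2020/day_13/part_1.py | earliest_departure
-- ===== SOURCE A (Python) =====
-- def earliest_departure(data):
--     delta = dict()
--     for mod_ in data[1]:
--         i = 0
--         while True:
--             if (data[0] + i) % mod_ == 0:
--                 delta[i] = mod_
--                 break
--             i += 1
--     return delta
-- ===== SOURCE B (Python) =====
-- def earliest_departure(data):
--     return {(-data[0]) % abs(m): m for m in data[1]}
-- ===== Notes on version B (the rewrite author's own statement) =====
-- stated objective: faster
-- what changed: replaces the per-bus incremental while-loop search with the closed form (-t) % abs(m) in a dict comprehension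
import Mathlib
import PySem

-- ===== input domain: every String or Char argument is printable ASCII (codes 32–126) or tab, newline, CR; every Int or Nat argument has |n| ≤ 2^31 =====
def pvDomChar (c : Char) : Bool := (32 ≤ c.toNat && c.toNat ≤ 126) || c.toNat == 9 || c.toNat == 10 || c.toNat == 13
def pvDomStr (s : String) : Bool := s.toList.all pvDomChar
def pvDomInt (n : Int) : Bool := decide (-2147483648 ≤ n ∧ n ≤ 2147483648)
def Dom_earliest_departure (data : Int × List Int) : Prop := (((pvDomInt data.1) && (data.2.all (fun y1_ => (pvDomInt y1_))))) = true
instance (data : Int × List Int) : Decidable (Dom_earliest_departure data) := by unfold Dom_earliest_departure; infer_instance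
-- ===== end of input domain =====

-- B replaces A's per-bus incremental while-loop with the closed form (-t) % abs(m); faster (asymptotic).

-- ===== PORT A =====
-- A's 'while True: if (data[0]+i) % mod_ == 0: …; i += 1' loop; fuel = |mod_| steps suffice
-- (under Pre_ the loop always exits before the fuel runs out; fuel 0 is unreachable).
def pvLoopA (d m : Int) : Nat → Int → Int
  | 0, i => i
  | fuel + 1, i => if PySem.Int.mod (d + i) m = 0 then i else pvLoopA d m fuel (i + 1)

def earliest_departure (data : Int × List Int) : List (Int × Int) :=
  (data.2.foldl (fun delta mod_ => delta.insert (pvLoopA data.1 mod_ mod_.natAbs 0) mod_)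
    (PySem.Dict.empty : PySem.Dict Int Int)).items

-- ===== PORT B =====
def earliest_departure_alt (data : Int × List Int) : List (Int × Int) :=
  (data.2.foldl
    (fun delta m => delta.insert (PySem.Int.mod (-data.1) (if m < 0 then -m else m)) m)
    (PySem.Dict.empty : PySem.Dict Int Int)).items

-- ===== PRECONDITION & SPEC =====
-- Pre_ excludes a bus id 0, on which Python's '% 0' raises ZeroDivisionError in both A and B.
def Pre_earliest_departure (data : Int × List Int) : Prop := ∀ m ∈ data.2, m ≠ 0
instance (data : Int × List Int) : Decidable (Pre_earliest_departure data) := by unfold Pre_earliest_departure; infer_instance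
def pvWitness_earliest_departure : (Int × List Int) := (939, [7, 13, 59, 31, 19])

def Spec_earliest_departure (data : Int × List Int) (out : List (Int × Int)) : Prop := out = earliest_departure_alt data
instance (data : Int × List Int) (out : List (Int × Int)) : Decidable (Spec_earliest_departure data out) := by unfold Spec_earliest_departure; infer_instance

-- ===== CLAIM (what is proved, stated in full; the proofs are below) =====
def Claim_equal_earliest_departure : Prop := ∀ (data : Int × List Int), Dom_earliest_departure data → Pre_earliest_departure data → Spec_earliest_departure data (earliest_departure data)

-- ===== LEMMAS AND PROOFS =====

-- A's loop, started at i with i ≤ r, returns r: r is the first index ≥ 0 whose check fires.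
theorem pvLoopA_eq (d m r : Int)
    (hfire : PySem.Int.mod (d + r) m = 0)
    (hmiss : ∀ j : Int, 0 ≤ j → j < r → PySem.Int.mod (d + j) m ≠ 0) :
    ∀ (fuel : Nat) (i : Int), 0 ≤ i → i ≤ r → r < i + fuel → pvLoopA d m fuel i = r := by
  intro fuel
  induction fuel with
  | zero => intro i _ h1 h2; omega
  | succ n ih =>
      intro i hi0 hir hlt
      unfold pvLoopA
      by_cases h : PySem.Int.mod (d + i) m = 0
      · simp only [h, if_true]
        by_contra hne
        exact hmiss i hi0 (lt_of_le_of_ne hir hne) h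
      · simp only [h, if_false]
        have : i ≠ r := fun e => h (e ▸ hfire)
        exact ih (i + 1) (by omega) (by omega) (by omega)

-- the per-bus closed form: A's search equals (-d) % |m| for m ≠ 0
theorem pvLoopA_closed (d m : Int) (hm : m ≠ 0) :
    pvLoopA d m m.natAbs 0 = PySem.Int.mod (-d) (if m < 0 then -m else m) := by
  set M : Int := if m < 0 then -m else m with hM
  have hMpos : 0 < M := by simp only [hM]; split <;> omega
  have hMabs : (m.natAbs : Int) = M := by simp only [hM]; split <;> omega
  set r : Int := PySem.Int.mod (-d) M with hr
  have hr0 : 0 ≤ r := PySem.Int.mod_nonneg _ hMpos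
  have hrM : r < M := PySem.Int.mod_lt _ hMpos
  have hmM : ∀ x : Int, m ∣ x ↔ M ∣ x := by
    intro x; simp only [hM]; split
    · exact neg_dvd.symm
    · exact Iff.rfl
  have hremod : r = (-d) % M := by
    rw [hr, PySem.Int.mod_eq_emod_of_pos hMpos]
  have hfire : PySem.Int.mod (d + r) m = 0 := by
    rw [PySem.Int.mod_eq_zero_iff_dvd, hmM, Int.dvd_iff_emod_eq_zero, hremod,
      Int.add_emod, Int.emod_emod_of_dvd _ dvd_rfl]
    simp
  have hmiss : ∀ j : Int, 0 ≤ j → j < r → PySem.Int.mod (d + j) m ≠ 0 := by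
    intro j hj0 hjr hcon
    rw [PySem.Int.mod_eq_zero_iff_dvd, hmM] at hcon
    have hfr : M ∣ (d + r) := by
      have := hfire; rwa [PySem.Int.mod_eq_zero_iff_dvd, hmM] at this
    have hdvd : M ∣ (r - j) := by
      have : (d + r) - (d + j) = r - j := by ring
      exact this ▸ dvd_sub hfr hcon
    have := Int.le_of_dvd (by omega) hdvd
    omega
  rw [hMabs] at *
  exact pvLoopA_eq d m r hfire hmiss m.natAbs 0 le_rfl hr0 (by omega)

-- ===== VERDICT (by name: the statement is the Claim_ definition above) =====
theorem earliest_departure_spec : Claim_equal_earliest_departure := by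
  intro data _ hpre
  unfold Spec_earliest_departure earliest_departure earliest_departure_alt
  congr 1
  apply PySem.List.foldl_congr_mem
  intro acc m hm
  rw [pvLoopA_closed data.1 m (hpre m hm)]
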